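-- pv_equiv track=rewrite | github.com/ksomemo/Competitive-programming | atcoder/other/keyence/keyence2019/C.py | f
-- ===== SOURCE A (Python) =====
-- def f(N, A, B):
--     diff = [b - a for a, b in zip(A, B)]
--     diff = sorted(diff)
--     diff_sum = sum(diff)
--
--     if diff_sum > 0:
--         return -1
--
--     if len([d for d in diff if d <= 0]) == N:
--         return 0
--
--     start = 0
--     end = N - 1
--     used = [False] * N
--     while start < end:
--         ds = diff[start]
--         de = diff[end]
--         if ds <= 0 and de <= 0:
--             break
--
--         if ds < 0 and de > 0:
--             cost = min(abs(ds), de)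
--             diff[start] += cost
--             diff[end] -= cost
--
--             used[start] = True
--             used[end] = True
--
--         if diff[start] >= 0:
--             start += 1
--         if diff[end] <= 0:
--             end -= 1
--
--     ans = sum(used)
--     return ans
-- ===== SOURCE B (Python) =====
-- def f(N, A, B):
--     diff = sorted(b - a for a, b in zip(A, B))
--     if sum(diff) > 0:
--         return -1
--     pos = [d for d in diff[:N] if d > 0]  # only the first N diffs are in play
--     if not pos:
--         return 0
--     sp = sum(pos)
--     q = 0
--     acc = 0
--     for d in diff:  # ascending order: largest negative magnitudes come first
--         if d >= 0:
--             break
--         acc += -d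
--         q += 1
--         if acc >= sp:
--             break
--     return len(pos) + q
-- ===== Notes on version B (the rewrite author's own statement) =====
-- stated objective: simpler
-- what changed: Replaces A's two-pointer loop that mutates the diff array and marks used indices by a direct computation: count the positives among the first N sorted diffs, then scan the sorted diffs once accumulating negative magnitudes until they cover the positive sum; Pre_ keeps the natural domain 0 <= N <= number of pairs (unless the diff total is positive, where both return -1 at once): outside it A raises IndexError when its loop runs past the diff array, and for negative N A's never-entered loop and B's Python negative-slice semantics are both accidental.
-- outside the precondition, e.g. on f(-1, [0, 0, 0], [-5, 1, 3]): A returns 0, B returns 2; on f(2, [1], [0]): A raises IndexError, B returns 0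
import Mathlib
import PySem

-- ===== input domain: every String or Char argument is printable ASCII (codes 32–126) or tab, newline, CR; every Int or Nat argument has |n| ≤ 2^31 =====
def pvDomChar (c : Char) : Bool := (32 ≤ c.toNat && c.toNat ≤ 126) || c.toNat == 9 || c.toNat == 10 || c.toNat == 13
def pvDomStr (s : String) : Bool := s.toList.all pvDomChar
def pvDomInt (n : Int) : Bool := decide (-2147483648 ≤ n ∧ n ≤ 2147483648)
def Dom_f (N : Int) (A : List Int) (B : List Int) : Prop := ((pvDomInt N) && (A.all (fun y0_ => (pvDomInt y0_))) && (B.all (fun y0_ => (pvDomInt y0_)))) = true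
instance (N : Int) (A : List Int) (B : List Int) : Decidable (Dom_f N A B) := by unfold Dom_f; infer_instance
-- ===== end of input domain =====

-- B replaces A's two-pointer mutate-and-mark pairing loop by counting the positives and
-- scanning the sorted diffs once, accumulating negative magnitudes until they cover the
-- positive sum (objective: simpler; equal return values proved on Pre_f below).

-- ===== PORT A =====
-- the while loop of A: state (diff, used, start, end); fuel only makes the loop total,
-- every Python iteration moves a pointer so (N.toNat + 1) fuel is never exhausted
def aLoop : Nat → List Int → List Bool → Int → Int → List Bool
  | 0, _, used, _, _ => used
  | fuel+1, d, used, s, e =>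
    if s < e then
      let ds := PySem.List.pyGetD d s 0
      let de := PySem.List.pyGetD d e 0
      if ds ≤ 0 ∧ de ≤ 0 then used
      else
        let step :=
          if ds < 0 ∧ 0 < de then
            let cost := min |ds| de
            (PySem.List.pySetD (PySem.List.pySetD d s (ds + cost)) e (de - cost),
             PySem.List.pySetD (PySem.List.pySetD used s true) e true)
          else (d, used)
        let d' := step.1
        let used' := step.2
        let s' := if 0 ≤ PySem.List.pyGetD d' s 0 then s + 1 else s
        let e' := if PySem.List.pyGetD d' e 0 ≤ 0 then e - 1 else e
        aLoop fuel d' used' s' e'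
    else used

def f (N : Int) (A : List Int) (B : List Int) : Int :=
  let diff := PySem.List.sorted ((A.zip B).map (fun p => p.2 - p.1)) (fun x => x) false
  let diffSum := diff.sum
  if diffSum > 0 then -1
  else if ((diff.filter (fun d => d ≤ 0)).length : Int) = N then 0
  else
    let used := aLoop (N.toNat + 1) diff (List.replicate N.toNat false) 0 (N - 1)
    used.foldl (fun a b => a + (if b then 1 else 0)) 0

-- ===== PORT B =====
-- B's scan: walk the sorted diffs, stop at the first non-negative entry or once the
-- accumulated magnitude covers sp
def bLoop (sp : Int) : List Int → Int → Int → Int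
  | [], _, q => q
  | x :: t, acc, q =>
    if 0 ≤ x then q
    else
      let acc' := acc + (-x)
      let q' := q + 1
      if sp ≤ acc' then q' else bLoop sp t acc' q'

def f_alt (N : Int) (A : List Int) (B : List Int) : Int :=
  let diff := PySem.List.sorted ((A.zip B).map (fun p => p.2 - p.1)) (fun x => x) false
  if diff.sum > 0 then -1
  else
    let pos := (PySem.List.slice diff none (some N)).filter (fun d => 0 < d)
    if pos = [] then 0
    else (pos.length : Int) + bLoop pos.sum diff 0 0

-- ===== PRECONDITION & SPEC =====
-- Pre_f keeps the natural domain where N is a count of pairs in play: unless the diffs are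
-- unbalanced upward (both return -1 at once), it requires 0 ≤ N ≤ number of pairs; outside it
-- A raises IndexError when its loop runs past the diff array, and for negative N A's never-run
-- loop and B's Python negative-slice semantics are both accidental.
def Pre_f (N : Int) (A : List Int) (B : List Int) : Prop :=
  0 < ((A.zip B).map (fun p => p.2 - p.1)).sum
    ∨ (0 ≤ N ∧ N ≤ (((A.zip B).map (fun p => p.2 - p.1)).length : Int))
instance (N : Int) (A : List Int) (B : List Int) : Decidable (Pre_f N A B) := by unfold Pre_f; infer_instance

def pvWitness_f : Int × List Int × List Int := (3, [1, 2, 3], [3, 1, 2])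

def Spec_f (N : Int) (A : List Int) (B : List Int) (out : Int) : Prop := out = f_alt N A B
instance (N : Int) (A : List Int) (B : List Int) (out : Int) : Decidable (Spec_f N A B out) := by unfold Spec_f; infer_instance

-- ===== CLAIM (what is proved, stated in full; the proofs are below) =====
def Claim_equal_f : Prop := ∀ (N : Int) (A : List Int) (B : List Int), Dom_f N A B → Pre_f N A B → Spec_f N A B (f N A B)

-- ===== LEMMAS AND PROOFS =====

-- proof-side quantities over the sorted diff list
def posCount (l : List Int) : Int := ((l.filter (fun x => 0 < x)).length : Int)
def posSum (l : List Int) : Int := (l.filter (fun x => 0 < x)).sum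
def negMags (l : List Int) : List Int := (l.filter (fun x => x < 0)).map (fun x => -x)

-- greedy cap counter: number of magnitudes (in order) consumed until they cover sp
def capCount : List Int → Int → Int
  | [], _ => 0
  | m :: t, sp => if sp ≤ 0 then 0 else 1 + capCount t (sp - m)

def Fval (m : List Int) : Int := posCount m + capCount (negMags m) (posSum m)

-- value still to be added to the used-count from a loop state (ds = d[s], mid = d(s..e), de = d[e],
-- us / ue = used[s] / used[e])
def Gval (ds : Int) (mid : List Int) (de : Int) (us ue : Bool) : Int :=
  posCount mid + (if 0 < de ∧ ue = false then 1 else 0) +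
    (if 0 < posSum mid + (if 0 < de then de else 0) then
       capCount ((if ds < 0 then [-ds] else []) ++ negMags mid)
         (posSum mid + (if 0 < de then de else 0)) - (if us then 1 else 0)
     else 0)

def countTrue (u : List Bool) : Int := (u.countP (fun b => b) : Int)

lemma capCount_nonpos (l : List Int) (sp : Int) (h : sp ≤ 0) : capCount l sp = 0 := by
  cases l <;> simp [capCount, h]

lemma countTrue_foldl (u : List Bool) :
    u.foldl (fun a b => a + (if b then 1 else 0)) 0 = countTrue u := by
  rw [PySem.List.foldl_add (l := u) (g := fun b => if b = true then (1:Int) else 0) (a := 0)]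
  simp [countTrue, PySem.List.sum_map_ite_one_zero]

-- getD / set on a decomposed list
lemma getD_append_len {α : Type} (p r : List α) (a d : α) :
    (p ++ a :: r).getD p.length d = a := by
  simp [List.getD]

lemma set_append_len {α : Type} (p r : List α) (a v : α) :
    (p ++ a :: r).set p.length v = p ++ v :: r := by
  simp

-- B's scan computes the greedy cap count
lemma bLoop_eq (sp : Int) (t : List Int) (acc q : Int)
    (hs : t.Pairwise (· ≤ ·)) (hacc : acc < sp) :
    bLoop sp t acc q = q + capCount (negMags t) (sp - acc) := by
  induction t generalizing acc q with
  | nil => simp [bLoop, negMags, capCount]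
  | cons x t ih =>
    have hx : ∀ y ∈ t, x ≤ y := fun y hy => (List.pairwise_cons.1 hs).1 y hy
    have hst : t.Pairwise (· ≤ ·) := (List.pairwise_cons.1 hs).2
    by_cases h0 : 0 ≤ x
    · have hnil : t.filter (fun x => decide (x < 0)) = [] := by
        apply List.filter_eq_nil_iff.2
        intro y hy
        simp only [decide_eq_true_eq, not_lt]
        exact le_trans h0 (hx y hy)
      simp [bLoop, h0, negMags, hnil, capCount]
    · have hneg : x < 0 := by omega
      have hmag : negMags (x :: t) = (-x) :: negMags t := by
        simp [negMags, hneg]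
      rw [hmag]
      simp only [bLoop, if_neg h0]
      by_cases hstop : sp ≤ acc + -x
      · rw [if_pos hstop]
        rw [capCount, if_neg (by omega : ¬ sp - acc ≤ 0)]
        rw [capCount_nonpos _ _ (by omega : sp - acc - -x ≤ 0)]
        omega
      · rw [if_neg hstop]
        rw [ih (acc + -x) (q + 1) hst (by omega)]
        rw [capCount, if_neg (by omega : ¬ sp - acc ≤ 0)]
        have : sp - (acc + -x) = sp - acc - -x := by ring
        rw [this]
        ring

lemma posSum_nonneg (l : List Int) : 0 ≤ posSum l := by
  apply List.sum_nonneg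
  intro z hz
  have := (List.mem_filter.1 hz).2
  simp at this
  omega

lemma Gval_fresh (x y : Int) (m2 : List Int)
    (hsort : (x :: (m2 ++ [y])).Pairwise (· ≤ ·))
    (hsum : x + m2.sum + y ≤ 0) :
    Gval x m2 y false false = Fval (x :: (m2 ++ [y])) := by
  have hall : ∀ z ∈ m2 ++ [y], x ≤ z := fun z hz => (List.pairwise_cons.1 hsort).1 z hz
  have hx : x ≤ 0 := by
    by_contra h
    push_neg at h
    have h1 : 0 ≤ m2.sum :=
      List.sum_nonneg fun z hz => le_of_lt (lt_of_lt_of_le h (hall z (by simp [hz])))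
    have h2 : x ≤ y := hall y (by simp)
    omega
  by_cases hy : 0 < y
  · have hsp : 0 < (m2.filter (fun x => decide (0 < x))).sum + y := by
      have h3 := posSum_nonneg m2
      simp only [posSum] at h3
      omega
    simp only [Gval, Fval, posCount, posSum, negMags, List.filter_cons, List.filter_append]
    simp [not_lt.2 hx, hy, not_lt.2 (le_of_lt hy), hsp]
    by_cases hxn : x < 0 <;> simp [hxn]
  · have hyz : ∀ z ∈ m2, z ≤ y := by
      intro z hz
      have := List.pairwise_append.1 (List.pairwise_cons.1 hsort).2
      exact (this.2.2 z hz y (by simp))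
    have hm2 : m2.filter (fun x => decide (0 < x)) = [] := by
      apply List.filter_eq_nil_iff.2
      intro z hz
      simp only [decide_eq_true_eq, not_lt]
      have := hyz z hz
      omega
    simp only [Gval, Fval, posCount, posSum, negMags, List.filter_cons, List.filter_append]
    simp [hy, not_lt.2 hx, hm2]
    exact (capCount_nonpos _ _ le_rfl).symm

-- indexed read/write on a decomposed list
lemma pyGetD_mid {α : Type} (p q r : List α) (a b d : α) :
    PySem.List.pyGetD (p ++ a :: (q ++ b :: r)) ((p.length : Int)) d = a := by
  rw [PySem.List.pyGetD_natCast]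
  exact getD_append_len p (q ++ b :: r) a d

lemma pyGetD_far {α : Type} (p q r : List α) (a b d : α) :
    PySem.List.pyGetD (p ++ a :: (q ++ b :: r)) ((p.length : Int) + (q.length : Int) + 1) d = b := by
  have h1 : ((p.length : Int) + (q.length : Int) + 1) = (((p.length + q.length + 1 : Nat)) : Int) := by
    push_cast
    ring
  have h2 : p ++ a :: (q ++ b :: r) = (p ++ a :: q) ++ b :: r := by simp
  have h3 : p.length + q.length + 1 = (p ++ a :: q).length := by simp; omega
  rw [h1, PySem.List.pyGetD_natCast, h2, h3]
  exact getD_append_len _ r b d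

lemma pySetD_mid {α : Type} (p q r : List α) (a b v : α) :
    PySem.List.pySetD (p ++ a :: (q ++ b :: r)) ((p.length : Int)) v = p ++ v :: (q ++ b :: r) := by
  rw [PySem.List.pySetD_natCast]
  exact set_append_len p (q ++ b :: r) a v

lemma pySetD_far {α : Type} (p q r : List α) (a b v : α) :
    PySem.List.pySetD (p ++ a :: (q ++ b :: r)) ((p.length : Int) + (q.length : Int) + 1) v = p ++ a :: (q ++ v :: r) := by
  have h1 : ((p.length : Int) + (q.length : Int) + 1) = (((p.length + q.length + 1 : Nat)) : Int) := by
    push_cast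
    ring
  have h2 : p ++ a :: (q ++ b :: r) = (p ++ a :: q) ++ b :: r := by simp
  have h3 : p.length + q.length + 1 = (p ++ a :: q).length := by simp; omega
  rw [h1, PySem.List.pySetD_natCast, h2, h3, set_append_len]
  simp

lemma pySetD_mid' {α : Type} (p q r : List α) (a b v : α) (i : Int) (hi : i = (p.length : Int)) :
    PySem.List.pySetD (p ++ a :: (q ++ b :: r)) i v = p ++ v :: (q ++ b :: r) := by
  subst hi
  exact pySetD_mid p q r a b v

lemma pySetD_far' {α : Type} (p q r : List α) (a b v : α) (i : Int)
    (hi : i = (p.length : Int) + (q.length : Int) + 1) :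
    PySem.List.pySetD (p ++ a :: (q ++ b :: r)) i v = p ++ a :: (q ++ v :: r) := by
  subst hi
  exact pySetD_far p q r a b v

lemma repl_shift {α : Type} (a : α) (k : Nat) (L : List α) :
    a :: (List.replicate k a ++ L) = List.replicate k a ++ a :: L := by
  induction k with
  | zero => rfl
  | succ k ihh =>
    rw [List.replicate_succ, List.cons_append, ihh]
    rfl

lemma aLoop_stop (fl : Nat) (d : List Int) (u : List Bool) (s e : Int) (h : ¬ s < e) :
    aLoop fl d u s e = u := by
  cases fl <;> simp [aLoop, h]

lemma countTrue_mark (upre usuf : List Bool) (k : Nat) (us ue : Bool) :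
    countTrue (upre ++ true :: (List.replicate k false ++ true :: usuf))
      = countTrue (upre ++ us :: (List.replicate k false ++ ue :: usuf))
        + (if us then 0 else 1) + (if ue then 0 else 1) := by
  cases us <;> cases ue <;>
    simp [countTrue, List.countP_append, List.countP_cons] <;> push_cast <;> ring

lemma Fval_nil : Fval [] = 0 := by
  simp [Fval, posCount, posSum, negMags, capCount]

lemma Fval_single (x : Int) (hx : x ≤ 0) : Fval [x] = 0 := by
  simp [Fval, posCount, posSum, negMags, not_lt.2 hx]
  exact capCount_nonpos _ _ le_rfl

lemma posCount_cons_nonpos (x : Int) (l : List Int) (hx : x ≤ 0) : posCount (x :: l) = posCount l := by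
  simp [posCount, not_lt.2 hx]
lemma posSum_cons_nonpos (x : Int) (l : List Int) (hx : x ≤ 0) : posSum (x :: l) = posSum l := by
  simp [posSum, not_lt.2 hx]
lemma negMags_cons (x : Int) (l : List Int) :
    negMags (x :: l) = (if x < 0 then [-x] else []) ++ negMags l := by
  by_cases h : x < 0 <;> simp [negMags, h]
lemma capCount_cons (m : Int) (t : List Int) (sp : Int) (h : 0 < sp) :
    capCount (m :: t) sp = 1 + capCount t (sp - m) := by
  simp [capCount, not_le.2 h]
lemma posCount_app (y : Int) (m2 : List Int) :
    posCount (m2 ++ [y]) = posCount m2 + (if 0 < y then 1 else 0) := by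
  by_cases h : 0 < y <;> simp [posCount, List.filter_append, h]
lemma posSum_app (y : Int) (m2 : List Int) :
    posSum (m2 ++ [y]) = posSum m2 + (if 0 < y then y else 0) := by
  by_cases h : 0 < y <;> simp [posSum, List.filter_append, h]
lemma negMags_app (y : Int) (m2 : List Int) :
    negMags (m2 ++ [y]) = negMags m2 ++ (if y < 0 then [-y] else []) := by
  by_cases h : y < 0 <;> simp [negMags, List.filter_append, h]

-- break: nothing left to mark
lemma GvalA (ds de : Int) (mid : List Int) (us ue : Bool)
    (hde : de ≤ 0) (hue : ue = false) (hmid : ∀ z ∈ mid, z ≤ de) :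
    Gval ds mid de us ue = 0 := by
  have hf : mid.filter (fun x => decide (0 < x)) = [] := by
    apply List.filter_eq_nil_iff.2
    intro z hz
    have := hmid z hz
    simp
    omega
  simp [Gval, posCount, posSum, hf, not_lt.2 hde]

-- transfer with empty interior
lemma GvalC0 (ds de : Int) (us ue : Bool) (hds : ds < 0) (hde : 0 < de) :
    Gval ds [] de us ue = (if us then 0 else 1) + (if ue then 0 else 1) := by
  simp [Gval, posCount, posSum, negMags, hds, hde, capCount, not_le.2 hde]
  cases us <;> cases ue <;> simp <;> omega

-- transfer consuming both ends exactly
lemma GvalB (ds de : Int) (mid : List Int) (us ue : Bool)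
    (hde : 0 < de) (hid : ds + de = 0) :
    Gval ds mid de us ue = (if us then 0 else 1) + (if ue then 0 else 1) + Fval mid := by
  have hds : ds < 0 := by omega
  have hsp : 0 < posSum mid + de := by have := posSum_nonneg mid; omega
  simp only [Gval, Fval, hde, if_pos, hds]
  rw [if_pos hsp]
  simp only [List.cons_append, List.nil_append, capCount, if_neg (not_le.2 hsp)]
  have h2 : posSum mid + de - -ds = posSum mid := by omega
  rw [h2]
  cases us <;> cases ue <;> simp <;> ring

-- transfer exhausting the start cell, end keeps a positive remainder
lemma GvalC (ds de x : Int) (rest : List Int) (us ue : Bool)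
    (hds : ds < 0) (hde : 0 < de) (hx : x ≤ 0) (hnde : 0 < de + ds) :
    Gval ds (x :: rest) de us ue
      = (if us then 0 else 1) + (if ue then 0 else 1) + Gval x rest (de + ds) false true := by
  have hpr := posSum_nonneg rest
  have hsp : 0 < posSum rest + de := by omega
  have hsp' : 0 < posSum rest + (de + ds) := by omega
  simp only [Gval, posCount_cons_nonpos _ _ hx, posSum_cons_nonpos _ _ hx, negMags_cons,
    if_pos hds, if_pos hde, if_pos hnde, List.singleton_append]
  rw [if_pos hsp, if_pos hsp', capCount_cons _ _ _ hsp]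
  have he : posSum rest + de - -ds = posSum rest + (de + ds) := by ring
  rw [he]
  cases us <;> cases ue <;> simp [hde] <;> omega

-- transfer exhausting the end cell, start keeps a negative remainder
lemma GvalD (ds de y : Int) (m2 : List Int) (us ue : Bool)
    (hds : ds < 0) (hde : 0 < de) (hnds : ds + de < 0) (hm2y : ∀ z ∈ m2, z ≤ y) :
    Gval ds (m2 ++ [y]) de us ue
      = (if us then 0 else 1) + (if ue then 0 else 1) + Gval (ds + de) m2 y true false := by
  have hpr := posSum_nonneg m2
  have hspL : 0 < posSum m2 + (if 0 < y then y else 0) + de := by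
    by_cases h : 0 < y <;> simp [h] <;> omega
  simp only [Gval, posCount_app, posSum_app, negMags_app, if_pos hds, if_pos hde,
    if_pos (show ds + de < 0 from hnds), List.singleton_append]
  rw [if_pos hspL, capCount_cons _ _ _ hspL]
  by_cases hy : 0 < y
  · have hsp3 : 0 < posSum m2 + (if 0 < y then y else 0) := by simp [hy]; omega
    rw [if_pos (by simpa [hy] using hsp3)]
    rw [capCount_cons _ _ _ (by simpa [hy] using hsp3)]
    have he1 : negMags m2 ++ (if y < 0 then [-y] else []) = negMags m2 := by
      simp [not_lt.2 (le_of_lt hy)]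
    rw [he1]
    have he2 : posSum m2 + (if 0 < y then y else 0) + de - -ds
        = posSum m2 + (if 0 < y then y else 0) - -(ds + de) := by ring
    rw [he2]
    cases us <;> cases ue <;> simp [hy, hde] <;> omega
  · have hm20 : ∀ z ∈ m2, z ≤ 0 := fun z hz => le_trans (hm2y z hz) (not_lt.1 hy)
    have hfm2 : m2.filter (fun x => decide (0 < x)) = [] := by
      apply List.filter_eq_nil_iff.2
      intro z hz
      have := hm20 z hz
      simp
      omega
    have hps0 : posSum m2 = 0 := by simp [posSum, hfm2]
    have hpc0 : posCount m2 = 0 := by simp [posCount, hfm2]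
    rw [if_neg (by simp [hy, hps0] : ¬ (0:Int) < posSum m2 + (if 0 < y then y else 0))]
    rw [capCount_nonpos _ _ (by simp [hy, hps0]; omega)]
    cases us <;> cases ue <;> simp [hy, hps0, hpc0, hde] <;> omega

-- skipping a zero start cell
lemma GvalE (de x : Int) (rest : List Int) (ue : Bool) (hde : 0 < de) (hx : x ≤ 0) :
    Gval 0 (x :: rest) de false ue = Gval x rest de false ue := by
  simp [Gval, posCount, posSum, negMags, List.filter_cons, not_lt.2 hx]
  by_cases hxn : x < 0 <;> simp [hxn]

-- the main loop invariant lemma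
lemma aLoop_count (fuel : Nat) (pre mid suf : List Int) (upre usuf : List Bool)
    (ds de : Int) (us ue : Bool)
    (hfuel : mid.length + 1 < fuel)
    (hlen : upre.length = pre.length)
    (hsum : ds + mid.sum + de ≤ 0)
    (hsortm : mid.Pairwise (· ≤ ·))
    (hds_mid : us = false → ∀ z ∈ mid, ds ≤ z)
    (hde_mid : ue = false → ∀ z ∈ mid, z ≤ de)
    (hdsde : us = false → ue = false → ds ≤ de)
    (hus : us = true → ds < 0)
    (hue : ue = true → 0 < de) :
    countTrue (aLoop fuel (pre ++ ds :: (mid ++ de :: suf))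
        (upre ++ us :: (List.replicate mid.length false ++ ue :: usuf))
        (pre.length : Int) ((pre.length : Int) + mid.length + 1))
      = countTrue (upre ++ us :: (List.replicate mid.length false ++ ue :: usuf))
        + Gval ds mid de us ue := by
  induction fuel generalizing pre mid suf upre usuf ds de us ue with
  | zero => omega
  | succ fuel ih =>
    simp only [aLoop]
    rw [if_pos (show (pre.length : Int) < (pre.length : Int) + mid.length + 1 by omega)]
    rw [pyGetD_mid, pyGetD_far]
    by_cases hbrk : ds ≤ 0 ∧ de ≤ 0
    · rw [if_pos hbrk]
      have hue0 : ue = false := by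
        cases hu : ue
        · rfl
        · exact absurd (hue hu) (by omega)
      rw [GvalA ds de mid us ue hbrk.2 hue0 (hde_mid hue0)]
      ring
    · rw [if_neg hbrk]
      by_cases htr : ds < 0 ∧ 0 < de
      · -- transfer step
        rw [if_pos htr]
        simp only []
        rw [abs_of_neg htr.1]
        rw [pySetD_mid, pySetD_far,
          pySetD_mid' upre (List.replicate mid.length false) usuf us ue true _ (by rw [hlen]),
          pySetD_far' upre (List.replicate mid.length false) usuf true ue true _ (by simp [hlen])]
        rw [pyGetD_mid, pyGetD_far]
        by_cases hc : -ds ≤ de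
        · rw [min_eq_left hc]
          rw [show ds + -ds = (0:Int) from by ring, show de - -ds = de + ds from by ring]
          rw [if_pos (le_refl (0:Int))]
          by_cases hz : de + ds ≤ 0
          · -- both ends exhausted
            have hz0 : de + ds = 0 := by omega
            have hid : ds + de = 0 := by omega
            rw [if_pos hz, hz0]
            rw [show ((pre.length : Int) + mid.length + 1 - 1) = (pre.length : Int) + mid.length from by ring]
            cases mid with
            | nil =>
              rw [aLoop_stop _ _ _ _ _ (by simp)]
              rw [countTrue_mark upre usuf (([] : List Int).length) us ue, GvalB ds de [] us ue htr.2 hid, Fval_nil]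
              ring
            | cons x rest =>
              rcases rest.eq_nil_or_concat with hr | ⟨m2, y, hr⟩
              · subst hr
                rw [aLoop_stop _ _ _ _ _ (by simp)]
                have hx : x ≤ 0 := by
                  simp at hsum
                  omega
                rw [countTrue_mark upre usuf ([x].length) us ue, GvalB ds de [x] us ue htr.2 hid,
                  Fval_single x hx]
                ring
              · subst hr
                simp only [List.concat_eq_append] at hfuel hsum hsortm hds_mid hde_mid ⊢
                have hd2 : pre ++ (0:Int) :: ((x :: (m2 ++ [y])) ++ (0:Int) :: suf)
                    = (pre ++ [(0:Int)]) ++ x :: (m2 ++ y :: ((0:Int) :: suf)) := by simp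
                have hu2 : upre ++ true :: (List.replicate (x :: (m2 ++ [y])).length false ++ true :: usuf)
                    = (upre ++ [true]) ++ false :: (List.replicate m2.length false ++ false :: (true :: usuf)) := by
                  simp [List.replicate_succ, List.replicate_succ', List.append_assoc, repl_shift]
                have hs2 : ((pre.length : Int) + 1) = (((pre ++ [(0:Int)]).length : Nat) : Int) := by simp
                have he2 : ((pre.length : Int) + ((x :: (m2 ++ [y])).length : Int))
                    = (((pre ++ [(0:Int)]).length : Nat) : Int) + (m2.length : Int) + 1 := by
                  push_cast [List.length_append, List.length_cons, List.length_nil]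
                  try omega
                have hsum2 : x + m2.sum + y ≤ 0 := by
                  simp at hsum
                  omega
                have hsm : (x :: (m2 ++ [y])).Pairwise (· ≤ ·) := hsortm
                rw [hd2, hu2, hs2, he2]
                rw [ih (pre ++ [(0:Int)]) m2 ((0:Int) :: suf) (upre ++ [true]) (true :: usuf) x y false false
                  (by simp at hfuel ⊢; omega) (by simp [hlen]) hsum2
                  ((List.pairwise_append.1 ((List.pairwise_cons.1 hsm).2)).1)
                  (fun _ z hz => (List.pairwise_cons.1 hsm).1 z (List.mem_append_left _ hz))
                  (fun _ z hz => (List.pairwise_append.1 ((List.pairwise_cons.1 hsm).2)).2.2 z hz y (by simp))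
                  (fun _ _ => (List.pairwise_cons.1 hsm).1 y (by simp))
                  (by simp) (by simp)]
                rw [Gval_fresh x y m2 hsm hsum2]
                rw [show (upre ++ [true]) ++ false :: (List.replicate m2.length false ++ false :: (true :: usuf))
                    = upre ++ true :: (List.replicate (x :: (m2 ++ [y])).length false ++ true :: usuf) from hu2.symm]
                rw [countTrue_mark upre usuf (x :: (m2 ++ [y])).length us ue,
                  GvalB ds de (x :: (m2 ++ [y])) us ue htr.2 hid]
                ring
          · -- start exhausted, end keeps a positive remainder
            rw [if_neg hz]
            cases mid with
            | nil =>
              rw [aLoop_stop _ _ _ _ _ (by simp)]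
              rw [countTrue_mark upre usuf (([] : List Int).length) us ue, GvalC0 ds de us ue htr.1 htr.2]
              ring
            | cons x rest =>
              have hx : x ≤ 0 := by
                by_contra hxp
                have hrs : 0 ≤ rest.sum :=
                  List.sum_nonneg fun z hz =>
                    le_of_lt (lt_of_lt_of_le (not_le.1 hxp) ((List.pairwise_cons.1 hsortm).1 z hz))
                simp at hsum
                omega
              have hd2 : pre ++ (0:Int) :: ((x :: rest) ++ (de + ds) :: suf)
                  = (pre ++ [(0:Int)]) ++ x :: (rest ++ (de + ds) :: suf) := by simp
              have hu2 : upre ++ true :: (List.replicate (x :: rest).length false ++ true :: usuf)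
                  = (upre ++ [true]) ++ false :: (List.replicate rest.length false ++ true :: usuf) := by
                simp [List.replicate_succ]
              have hs2 : ((pre.length : Int) + 1) = (((pre ++ [(0:Int)]).length : Nat) : Int) := by simp
              have he2 : ((pre.length : Int) + ((x :: rest).length : Int) + 1)
                  = (((pre ++ [(0:Int)]).length : Nat) : Int) + (rest.length : Int) + 1 := by
                push_cast
                simp
                ring
              rw [hd2, hu2, hs2, he2]
              rw [ih (pre ++ [(0:Int)]) rest suf (upre ++ [true]) usuf x (de + ds) false true
                (by simp at hfuel ⊢; omega) (by simp [hlen]) (by simp at hsum ⊢; omega)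
                ((List.pairwise_cons.1 hsortm).2)
                (fun _ z hz => (List.pairwise_cons.1 hsortm).1 z hz)
                (by simp) (by simp) (by simp) (fun _ => by omega)]
              rw [GvalC ds de x rest us ue htr.1 htr.2 hx (by omega)]
              rw [show (upre ++ [true]) ++ false :: (List.replicate rest.length false ++ true :: usuf)
                  = upre ++ true :: (List.replicate (x :: rest).length false ++ true :: usuf) from hu2.symm]
              rw [countTrue_mark upre usuf (x :: rest).length us ue]
              ring
        · -- end exhausted, start keeps a negative remainder
          rw [min_eq_right (by omega : de ≤ -ds)]
          rw [show de - de = (0:Int) from by ring]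
          rw [if_neg (by omega : ¬ (0:Int) ≤ ds + de), if_pos (le_refl (0:Int))]
          rw [show ((pre.length : Int) + mid.length + 1 - 1) = (pre.length : Int) + mid.length from by ring]
          rcases mid.eq_nil_or_concat with hr | ⟨m2, y, hr⟩
          · subst hr
            rw [aLoop_stop _ _ _ _ _ (by simp)]
            rw [countTrue_mark upre usuf (([] : List Int).length) us ue, GvalC0 ds de us ue htr.1 htr.2]
            ring
          · subst hr
            simp only [List.concat_eq_append] at hfuel hsum hsortm hds_mid hde_mid ⊢
            have hd2 : pre ++ (ds + de) :: ((m2 ++ [y]) ++ (0:Int) :: suf)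
                = pre ++ (ds + de) :: (m2 ++ y :: ((0:Int) :: suf)) := by simp
            have hu2 : upre ++ true :: (List.replicate (m2 ++ [y]).length false ++ true :: usuf)
                = upre ++ true :: (List.replicate m2.length false ++ false :: (true :: usuf)) := by
              simp [List.replicate_succ', List.append_assoc, repl_shift]
            have he2 : ((pre.length : Int) + ((m2 ++ [y]).length : Int))
                = (pre.length : Int) + (m2.length : Int) + 1 := by
              push_cast [List.length_append, List.length_cons, List.length_nil]
              try omega
            have hm2y : ∀ z ∈ m2, z ≤ y :=
              fun z hz => (List.pairwise_append.1 hsortm).2.2 z hz y (by simp)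
            rw [hd2, hu2, he2]
            rw [ih pre m2 ((0:Int) :: suf) upre (true :: usuf) (ds + de) y true false
              (by simp at hfuel ⊢; omega) hlen (by simp at hsum ⊢; omega)
              ((List.pairwise_append.1 hsortm).1)
              (by simp) (fun _ => hm2y) (by simp) (fun _ => by omega) (by simp)]
            rw [GvalD ds de y m2 us ue htr.1 htr.2 (by omega) hm2y]
            rw [show upre ++ true :: (List.replicate m2.length false ++ false :: (true :: usuf))
                = upre ++ true :: (List.replicate (m2 ++ [y]).length false ++ true :: usuf) from hu2.symm]
            rw [countTrue_mark upre usuf (m2 ++ [y]).length us ue]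
            ring
      · -- no transfer: ds = 0 and 0 < de
        rw [if_neg htr]
        have hus0 : us = false := by
          cases hu : us
          · rfl
          · exfalso
            have hds := hus hu
            have hde0 : de ≤ 0 := by
              by_contra hde0
              exact htr ⟨hds, not_le.1 hde0⟩
            exact hbrk ⟨le_of_lt hds, hde0⟩
        have hds0 : ds = 0 := by
          rcases lt_trichotomy ds 0 with h | h | h
          · exfalso
            have hde0 : de ≤ 0 := by
              by_contra hde0
              exact htr ⟨h, not_le.1 hde0⟩
            exact hbrk ⟨le_of_lt h, hde0⟩
          · exact h
          · exfalso
            have hms : 0 ≤ mid.sum :=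
              List.sum_nonneg fun z hz =>
                le_of_lt (lt_of_lt_of_le h (hds_mid hus0 z hz))
            have hdep : 0 < de := by
              cases hu : ue
              · have := hdsde hus0 hu
                omega
              · exact hue hu
            omega
        have hdep : 0 < de := by
          by_contra hde0
          exact hbrk ⟨by omega, not_lt.1 hde0⟩
        subst hus0
        subst hds0
        simp only []
        rw [pyGetD_mid, pyGetD_far]
        rw [if_pos (le_refl (0:Int)), if_neg (not_le.2 hdep)]
        cases mid with
        | nil =>
          exfalso
          simp at hsum
          omega
        | cons x rest =>
          have hx : x ≤ 0 := by
            by_contra hxp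
            have hrs : 0 ≤ rest.sum :=
              List.sum_nonneg fun z hz =>
                le_of_lt (lt_of_lt_of_le (not_le.1 hxp) ((List.pairwise_cons.1 hsortm).1 z hz))
            simp at hsum
            omega
          have hd2 : pre ++ (0:Int) :: ((x :: rest) ++ de :: suf)
              = (pre ++ [(0:Int)]) ++ x :: (rest ++ de :: suf) := by simp
          have hu2 : upre ++ false :: (List.replicate (x :: rest).length false ++ ue :: usuf)
              = (upre ++ [false]) ++ false :: (List.replicate rest.length false ++ ue :: usuf) := by
            simp [List.replicate_succ]
          have hs2 : ((pre.length : Int) + 1) = (((pre ++ [(0:Int)]).length : Nat) : Int) := by simp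
          have he2 : ((pre.length : Int) + ((x :: rest).length : Int) + 1)
              = (((pre ++ [(0:Int)]).length : Nat) : Int) + (rest.length : Int) + 1 := by
            push_cast
            simp
            ring
          rw [hd2, hu2, hs2, he2]
          rw [ih (pre ++ [(0:Int)]) rest suf (upre ++ [false]) usuf x de false ue
            (by simp at hfuel ⊢; omega) (by simp [hlen]) (by simp at hsum ⊢; omega)
            ((List.pairwise_cons.1 hsortm).2)
            (fun _ z hz => (List.pairwise_cons.1 hsortm).1 z hz)
            (fun h z hz => hde_mid h z (by simp [hz]))
            (fun _ h => hde_mid h x (by simp))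
            (by simp) hue]
          rw [GvalE de x rest ue hdep hx]

-- a list of nonpositive elements has nonpositive sum
lemma sum_nonpos_of_all (l : List Int) (h : ∀ z ∈ l, z ≤ 0) : l.sum ≤ 0 := by
  induction l with
  | nil => simp
  | cons x t ih =>
    have hx := h x (by simp)
    have ht := ih (fun z hz => h z (by simp [hz]))
    simp
    omega

-- a prefix of a sorted list with nonpositive total also has nonpositive sum
lemma take_sum_nonpos (L : List Int) (k : Nat)
    (hsort : L.Pairwise (· ≤ ·)) (hsum : L.sum ≤ 0) : (L.take k).sum ≤ 0 := by
  by_contra hpos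
  push_neg at hpos
  have hz : ∃ z ∈ L.take k, 0 < z := by
    by_contra hno
    push_neg at hno
    exact absurd (sum_nonpos_of_all _ hno) (not_le.2 hpos)
  obtain ⟨z, hzmem, hz0⟩ := hz
  have hsplit : L = L.take k ++ L.drop k := (List.take_append_drop k L).symm
  have hpair := List.pairwise_append.1 (hsplit ▸ hsort)
  have hdrop : 0 ≤ (L.drop k).sum :=
    List.sum_nonneg fun b hb => le_of_lt (lt_of_lt_of_le hz0 (hpair.2.2 z hzmem b hb))
  have : L.sum = (L.take k).sum + (L.drop k).sum := by
    conv_lhs => rw [hsplit]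
    simp
  omega

-- in a sorted list the nonpositive elements are exactly the prefix of their count
lemma filter_nonpos_eq_take (L : List Int) (hsort : L.Pairwise (· ≤ ·)) :
    L.filter (fun d => decide (d ≤ 0)) = L.take (L.filter (fun d => decide (d ≤ 0))).length := by
  induction L with
  | nil => simp
  | cons x t ih =>
    have hxall : ∀ z ∈ t, x ≤ z := fun z hz => (List.pairwise_cons.1 hsort).1 z hz
    by_cases hx : x ≤ 0
    · have ih' := ih ((List.pairwise_cons.1 hsort).2)
      simp only [List.filter_cons, decide_eq_true_eq, if_pos hx, List.length_cons, List.take_succ_cons]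
      exact congrArg (x :: ·) ih'
    · have ht : t.filter (fun d => decide (d ≤ 0)) = [] := by
        apply List.filter_eq_nil_iff.2
        intro z hz
        have := hxall z hz
        simp
        omega
      simp [List.filter_cons, hx, ht]

-- the greedy cap counter never looks past a block that already covers sp
lemma capCount_append (l1 l2 : List Int) (sp : Int) (h : sp ≤ l1.sum) :
    capCount (l1 ++ l2) sp = capCount l1 sp := by
  induction l1 generalizing sp with
  | nil =>
    simp at h
    simp [capCount_nonpos _ _ h, capCount]
  | cons m t ih =>
    by_cases h0 : sp ≤ 0
    · simp [capCount, h0]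
    · simp only [List.cons_append, capCount, if_neg h0]
      rw [ih (sp - m) (by simp at h; omega)]

-- total = positive part minus negative magnitudes
lemma sum_split (l : List Int) : l.sum = posSum l - (negMags l).sum := by
  induction l with
  | nil => simp [posSum, negMags]
  | cons x t ih =>
    rcases lt_trichotomy x 0 with h | h | h
    · have h2 : ¬ 0 < x := by omega
      simp [posSum, negMags, List.filter_cons, h, h2] at *
      omega
    · subst h
      simp [posSum, negMags, List.filter_cons] at *
      omega
    · have h2 : ¬ x < 0 := by omega
      simp [posSum, negMags, List.filter_cons, h, h2] at *
      omega

lemma negMags_append (l1 l2 : List Int) : negMags (l1 ++ l2) = negMags l1 ++ negMags l2 := by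
  simp [negMags, List.filter_append]

-- reading an index of the nonpositive prefix
lemma getD_mem_take (L : List Int) (i k : Nat) (hik : i < k) (hil : i < L.length) :
    L.getD i 0 ∈ L.take k := by
  rw [List.getD_eq_getElem L 0 hil]
  have hmin : i < min k L.length := by omega
  have : (L.take k)[i]'(by simpa using hmin) = L[i] := List.getElem_take
  rw [← this]
  exact List.getElem_mem _

-- if the first k entries are all nonpositive, A's loop on [0, k-1] breaks at once
lemma aLoop_break_prefix (fl : Nat) (L : List Int) (u : List Bool) (k : Nat)
    (hkl : k ≤ L.length) (hw : ∀ z ∈ L.take k, z ≤ 0) :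
    aLoop (fl + 1) L u 0 ((k : Int) - 1) = u := by
  by_cases hk : (0 : Int) < (k : Int) - 1
  · have hk2 : 2 ≤ k := by omega
    simp only [aLoop, if_pos hk]
    have h0 : PySem.List.pyGetD L (0 : Int) 0 ≤ 0 := by
      have : ((0 : Nat) : Int) = (0 : Int) := by norm_num
      rw [← this, PySem.List.pyGetD_natCast]
      exact hw _ (getD_mem_take L 0 k (by omega) (by omega))
    have h1 : PySem.List.pyGetD L ((k : Int) - 1) 0 ≤ 0 := by
      have hc : ((k : Int) - 1) = ((k - 1 : Nat) : Int) := by omega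
      rw [hc, PySem.List.pyGetD_natCast]
      exact hw _ (getD_mem_take L (k - 1) k (by omega) (by omega))
    rw [if_pos ⟨h0, h1⟩]
  · exact aLoop_stop _ _ _ _ _ hk

-- the loop branch of A equals the scan branch of B, on the window of the first k entries
lemma main_branch (L : List Int) (k : Nat) (hk2 : 2 ≤ k) (hkl : k ≤ L.length)
    (hsort : L.Pairwise (· ≤ ·)) (hsumw : (L.take k).sum ≤ 0)
    (hpos : (L.take k).filter (fun d => decide (0 < d)) ≠ []) :
    (aLoop (k + 1) L (List.replicate k false) 0 ((k : Int) - 1)).foldl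
        (fun a b => a + (if b then 1 else 0)) 0
      = (((L.take k).filter (fun d => decide (0 < d))).length : Int)
        + bLoop ((L.take k).filter (fun d => decide (0 < d))).sum L 0 0 := by
  have hwlen : (L.take k).length = k := by simp; omega
  rcases hW : L.take k with _ | ⟨x, rest⟩
  · rw [hW] at hwlen
    simp at hwlen
    omega
  · rcases rest.eq_nil_or_concat with hr | ⟨mid, y, hr⟩
    · rw [hW, hr] at hwlen
      simp at hwlen
      omega
    · subst hr
      rw [List.concat_eq_append] at hW
      simp only [List.concat_eq_append]
      rw [hW] at hpos
      have hsplit : L = (x :: (mid ++ [y])) ++ L.drop k := by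
        conv_lhs => rw [← List.take_append_drop k L, hW]
      have hLform : L = x :: (mid ++ y :: L.drop k) := by
        conv_lhs => rw [hsplit]
        simp
      have hk3 : k = mid.length + 2 := by
        rw [hW] at hwlen
        simp at hwlen
        omega
      have hsortw : (x :: (mid ++ [y])).Pairwise (· ≤ ·) := by
        rw [← hW]
        exact hsort.sublist (List.take_sublist k L)
      have hsum' : x + mid.sum + y ≤ 0 := by
        rw [hW] at hsumw
        simp at hsumw
        omega
      have key := aLoop_count (k + 1) [] mid (L.drop k) [] [] x y false false
        (by omega) rfl hsum'
        ((List.pairwise_append.1 (List.pairwise_cons.1 hsortw).2).1)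
        (fun _ z hz => (List.pairwise_cons.1 hsortw).1 z (List.mem_append_left _ hz))
        (fun _ z hz => (List.pairwise_append.1 (List.pairwise_cons.1 hsortw).2).2.2 z hz y (by simp))
        (fun _ _ => (List.pairwise_cons.1 hsortw).1 y (by simp))
        (by simp) (by simp)
      simp only [List.nil_append, List.length_nil, Nat.cast_zero, zero_add] at key
      have he : ((k : Int) - 1) = (mid.length : Int) + 1 := by omega
      have hrep : List.replicate k false
          = false :: (List.replicate mid.length false ++ false :: ([] : List Bool)) := by
        rw [hk3, List.replicate_succ, List.replicate_succ' (n := mid.length)]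
      rw [countTrue_foldl, he, hrep]
      conv_lhs => rw [hLform]
      rw [key]
      have hct : countTrue (false :: (List.replicate mid.length false ++ false :: ([] : List Bool))) = 0 := by
        simp [countTrue]
      rw [hct, Gval_fresh x y mid hsortw hsum']
      have hsp : 0 < ((x :: (mid ++ [y])).filter (fun d => decide (0 < d))).sum := by
        apply List.sum_pos
        · intro z hz
          have hz2 := (List.mem_filter.1 hz).2
          simp at hz2
          omega
        · exact hpos
      rw [bLoop_eq _ _ 0 0 hsort (by omega)]
      have hmagL : negMags L = negMags (x :: (mid ++ [y])) ++ negMags (L.drop k) := by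
        conv_lhs => rw [hsplit]
        exact negMags_append _ _
      have hcover : posSum (x :: (mid ++ [y])) ≤ (negMags (x :: (mid ++ [y]))).sum := by
        have := sum_split (x :: (mid ++ [y]))
        have hs : (x :: (mid ++ [y])).sum ≤ 0 := by
          simp
          omega
        omega
      rw [hmagL, capCount_append _ _ _ (by simpa [posSum] using hcover)]
      simp [Fval, posCount, posSum]

-- ===== VERDICT (by name: the statement is the Claim_ definition above) =====
theorem f_spec : Claim_equal_f := by
  intro N A B _ hpre
  unfold Spec_f f f_alt Pre_f at *
  simp only []
  set d0 := (A.zip B).map (fun p => p.2 - p.1) with hd0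
  set L := PySem.List.sorted d0 (fun x => x) false with hL
  have hperm : L.Perm d0 := PySem.List.sorted_perm d0 (fun x => x) false
  have hsumeq : L.sum = d0.sum := hperm.sum_eq
  have hleneq : L.length = d0.length := hperm.length_eq
  have hsort : L.Pairwise (· ≤ ·) := by
    simpa using PySem.List.sorted_pairwise (xs := d0) (key := fun x => x)
  by_cases hsum : L.sum > 0
  · simp [hsum]
  · rw [if_neg hsum, if_neg hsum]
    have hN : 0 ≤ N ∧ N ≤ (d0.length : Int) := by
      rcases hpre with h | h
      · exfalso
        rw [hsumeq] at hsum
        omega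
      · exact h
    set k := N.toNat with hk
    have hNk : N = (k : Int) := by omega
    have hkl : k ≤ L.length := by omega
    have hslice : PySem.List.slice L none (some N) = L.take k := by
      rw [PySem.List.slice_to _ hN.1]
    rw [hslice]
    by_cases hpw : (L.take k).filter (fun d => decide (0 < d)) = []
    · rw [if_pos hpw]
      have hwnp : ∀ z ∈ L.take k, z ≤ 0 := by
        intro z hz
        by_contra hzp
        rw [List.filter_eq_nil_iff] at hpw
        exact hpw z hz (by simp; omega)
      by_cases hall : ((L.filter (fun d => decide (d ≤ 0))).length : Int) = N
      · rw [if_pos hall]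
      · rw [if_neg hall]
        have hNk1 : N - 1 = (k : Int) - 1 := by omega
        rw [hNk1]
        have hfuel : N.toNat + 1 = k + 1 := by omega
        rw [hfuel, aLoop_break_prefix k L _ k hkl hwnp]
        rw [countTrue_foldl]
        have : N.toNat = k := rfl
        simp [countTrue, this]
    · rw [if_neg hpw]
      -- the window holds a positive, so k ≥ 2 and A's all-nonpositive gate is off
      have hk2 : 2 ≤ k := by
        by_contra hklt
        push_neg at hklt
        interval_cases k
        · simp at hpw
        · -- k = 1: the single smallest diff positive would force a positive total
          obtain ⟨z, hzmem, hz0⟩ : ∃ z ∈ L.take 1, 0 < z := by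
            rcases hq : (L.take 1).filter (fun d => decide (0 < d)) with _ | ⟨z, _⟩
            · exact absurd hq hpw
            · have hzin := List.mem_filter.1 (hq ▸ List.mem_cons_self)
              exact ⟨z, hzin.1, by simpa using hzin.2⟩
          rcases hLc : L with _ | ⟨h0, t0⟩
          · rw [hLc] at hzmem
            simp at hzmem
          · rw [hLc] at hzmem
            simp at hzmem
            subst hzmem
            have hallpos : ∀ w ∈ L, 0 < w := by
              intro w hw
              rw [hLc] at hw
              rcases List.mem_cons.1 hw with hw0 | hwt
              · omega
              · have := (List.pairwise_cons.1 (hLc ▸ hsort)).1 w hwt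
                omega
            have : 0 < L.sum := List.sum_pos _ hallpos (by rw [hLc]; simp)
            omega
      have hall : ¬ ((L.filter (fun d => decide (d ≤ 0))).length : Int) = N := by
        intro hcnt
        have hcntk : (L.filter (fun d => decide (d ≤ 0))).length = k := by omega
        have htk : L.filter (fun d => decide (d ≤ 0)) = L.take k := by
          rw [filter_nonpos_eq_take L hsort, hcntk]
        have : ∀ z ∈ L.take k, z ≤ 0 := by
          intro z hz
          have := List.mem_filter.1 (htk ▸ hz)
          simpa using this.2
        apply hpw
        apply List.filter_eq_nil_iff.2
        intro z hz
        have := this z hz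
        simp
        omega
      rw [if_neg hall]
      have hNk1 : N - 1 = (k : Int) - 1 := by omega
      have hfuel : N.toNat + 1 = k + 1 := by omega
      have hrepl : List.replicate N.toNat false = List.replicate k false := rfl
      rw [hNk1, hfuel, hrepl]
      exact main_branch L k hk2 hkl hsort
        (take_sum_nonpos L k hsort (not_lt.1 hsum)) hpw
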